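-- pv_equiv track=rewrite | github.com/major-scale/anim-counting | scripts/nonnormal_directional.py | bits_that_flip
-- ===== SOURCE A (Python) =====
-- NUM_COLUMNS = 4
--
-- def bits_that_flip(count):
--     """Return list of bit indices that flip when going from count to count+1."""
--     if count >= 14:
--         return []
--     flipping = []
--     for b in range(NUM_COLUMNS):
--         if (count >> b) & 1 == 1:
--             flipping.append(b)  # this bit resets (1→0 via carry)
--         else:
--             flipping.append(b)  # this bit flips on
--             break  # carry stops here
--     return flipping
-- ===== SOURCE B (Python) =====
-- NUM_COLUMNS = 4
--
-- # Flip pattern for count -> count+1 depends only on the low NUM_COLUMNS bits: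
-- # entry r holds the indices of the trailing-ones run of r plus the bit that turns on.
-- _FLIPS = [
--     [0], [0, 1], [0], [0, 1, 2],
--     [0], [0, 1], [0], [0, 1, 2, 3],
--     [0], [0, 1], [0], [0, 1, 2],
--     [0], [0, 1], [0], [0, 1, 2, 3],
-- ]
--
-- def bits_that_flip(count):
--     """Return list of bit indices that flip when going from count to count+1."""
--     if count >= 14:
--         return []
--     return _FLIPS[count % 16]
-- ===== Notes on version B (the rewrite author's own statement) =====
-- stated objective: alternative
-- what changed: Replaces A's sequential carry simulation (loop over bits with append-then-break at the first zero bit) by a single precomputed lookup table indexed by the low NUM_COLUMNS bits of count (count mod sixteen), since the flip set only depends on those bits.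
import Mathlib
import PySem

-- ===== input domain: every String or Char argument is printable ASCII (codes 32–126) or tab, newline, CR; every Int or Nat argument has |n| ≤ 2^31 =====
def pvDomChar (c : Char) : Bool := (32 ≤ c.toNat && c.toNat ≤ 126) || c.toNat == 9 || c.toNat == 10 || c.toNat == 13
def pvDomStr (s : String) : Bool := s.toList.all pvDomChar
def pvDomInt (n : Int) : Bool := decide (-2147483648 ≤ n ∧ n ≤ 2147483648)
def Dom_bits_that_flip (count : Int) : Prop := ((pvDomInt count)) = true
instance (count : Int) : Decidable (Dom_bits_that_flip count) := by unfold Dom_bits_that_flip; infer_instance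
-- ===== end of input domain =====

-- B replaces A's per-bit carry-simulation loop (append, break at first zero bit)
-- by a precomputed flip table indexed by the low NUM_COLUMNS bits of count; same return value.


-- ===== PORT A =====
-- the for-loop with break: acc is `flipping`, the list argument is the rest of range(4);
-- (count >> b) & 1 ported exactly as PySem.Int.band (count >>> b) 1 (b from range(4) is nonneg)
def pvGoA (count : Int) : List Int → List Int → List Int
  | acc, [] => acc
  | acc, b :: rest =>
    if PySem.Int.band (count >>> b.toNat) 1 = 1 then
      pvGoA count (acc ++ [b]) rest
    else
      acc ++ [b]

def bits_that_flip (count : Int) : List Int :=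
  if count ≥ 14 then []
  else pvGoA count [] (PySem.List.pyRange 0 4 1)

-- ===== PORT B =====
def pvFlips : List (List Int) :=
  [[0], [0, 1], [0], [0, 1, 2],
   [0], [0, 1], [0], [0, 1, 2, 3],
   [0], [0, 1], [0], [0, 1, 2],
   [0], [0, 1], [0], [0, 1, 2, 3]]

-- _FLIPS[count % 16]: the index is always in [0,16) so the .getD [] default is unreachable
def bits_that_flip_alt (count : Int) : List Int :=
  if count ≥ 14 then []
  else (PySem.List.pyGet? pvFlips (PySem.Int.mod count 16)).getD []

-- ===== PRECONDITION & SPEC =====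
def Spec_bits_that_flip (count : Int) (out : List Int) : Prop := out = bits_that_flip_alt count
instance (count : Int) (out : List Int) : Decidable (Spec_bits_that_flip count out) := by unfold Spec_bits_that_flip; infer_instance

-- ===== CLAIM (what is proved, stated in full; the proofs are below) =====
def Claim_equal_bits_that_flip : Prop := ∀ (count : Int), Dom_bits_that_flip count → Spec_bits_that_flip count (bits_that_flip count)

-- ===== LEMMAS AND PROOFS =====

theorem pvBand1 (a : Int) : PySem.Int.band a 1 = a % 2 := by
  rw [PySem.Int.band_one, PySem.Int.mod_eq_emod_of_pos (by norm_num)]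

theorem pvMod16 (count : Int) : PySem.Int.mod count 16 = count % 16 :=
  PySem.Int.mod_eq_emod_of_pos (by norm_num)

-- ===== VERDICT (by name: the statement is the Claim_ definition above) =====
theorem bits_that_flip_spec : Claim_equal_bits_that_flip := by
  intro count _
  unfold Spec_bits_that_flip bits_that_flip bits_that_flip_alt
  by_cases h14 : count ≥ 14
  · simp [h14]
  · simp only [h14, if_false, pvMod16]
    have h16 : 0 ≤ count % 16 ∧ count % 16 < 16 := ⟨Int.emod_nonneg _ (by norm_num), Int.emod_lt_of_pos _ (by norm_num)⟩
    have hr : count % 16 = 0 ∨ count % 16 = 1 ∨ count % 16 = 2 ∨ count % 16 = 3 ∨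
        count % 16 = 4 ∨ count % 16 = 5 ∨ count % 16 = 6 ∨ count % 16 = 7 ∨
        count % 16 = 8 ∨ count % 16 = 9 ∨ count % 16 = 10 ∨ count % 16 = 11 ∨
        count % 16 = 12 ∨ count % 16 = 13 ∨ count % 16 = 14 ∨ count % 16 = 15 := by omega
    rcases hr with h|h|h|h|h|h|h|h|h|h|h|h|h|h|h|h <;>
      rw [h, show PySem.List.pyRange 0 4 1 = [0, 1, 2, 3] from by decide] <;>
      norm_num [pvGoA, pvBand1, Int.shiftRight_eq_div_pow, pvFlips, PySem.List.pyGet?, PySem.List.pyIdx?] <;>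
      split_ifs <;> simp_all <;> omega
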